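-- pv_equiv track=rewrite | github.com/jiajunma/unirepn | combunipotent/LS.py | _char_twist_D
-- ===== SOURCE A (Python) =====
-- def _char_twist_D(irr_s,twist):
--     """
--     twist type D irreducible local system
--     """
--     tp, tn = twist
--     irr_ss = []
--     for i, (pp,nn) in enumerate(irr_s):
--         hrl, rrl = divmod(i+1, 2)
--         if rrl == 0:
--             irr_ss.append((pp,nn))
--         else:
--             tpp = (tp**(hrl+1))*(tn**hrl)
--             tnn = (tn**(hrl+1))*(tp**hrl)
--             irr_ss.append((tpp*pp,tnn*nn))
--     return tuple(irr_ss)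
-- ===== SOURCE B (Python) =====
-- def _char_twist_D(irr_s, twist):
--     # Running-product version: the twist factors for consecutive odd positions
--     # each grow by a factor tp*tn, so maintain them incrementally (O(n) ring
--     # multiplications) instead of recomputing powers at every step.
--     tp, tn = twist
--     t = tp * tn
--     fp, fn = tp, tn
--     out = []
--     apply_twist = True
--     for pp, nn in irr_s:
--         if apply_twist:
--             out.append((fp * pp, fn * nn))
--             fp *= t
--             fn *= t
--         else:
--             out.append((pp, nn))
--         apply_twist = not apply_twist
--     return tuple(out)
-- ===== Notes on version B (the rewrite author's own statement) =====
-- stated objective: faster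
-- what changed: B replaces A's per-element recomputation of the twist powers tp**(h+1)*tn**h via exponentiation with running products updated by one multiplication by tp*tn at each applied position, and replaces the enumerate/divmod index arithmetic with an alternating boolean.
import Mathlib
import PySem

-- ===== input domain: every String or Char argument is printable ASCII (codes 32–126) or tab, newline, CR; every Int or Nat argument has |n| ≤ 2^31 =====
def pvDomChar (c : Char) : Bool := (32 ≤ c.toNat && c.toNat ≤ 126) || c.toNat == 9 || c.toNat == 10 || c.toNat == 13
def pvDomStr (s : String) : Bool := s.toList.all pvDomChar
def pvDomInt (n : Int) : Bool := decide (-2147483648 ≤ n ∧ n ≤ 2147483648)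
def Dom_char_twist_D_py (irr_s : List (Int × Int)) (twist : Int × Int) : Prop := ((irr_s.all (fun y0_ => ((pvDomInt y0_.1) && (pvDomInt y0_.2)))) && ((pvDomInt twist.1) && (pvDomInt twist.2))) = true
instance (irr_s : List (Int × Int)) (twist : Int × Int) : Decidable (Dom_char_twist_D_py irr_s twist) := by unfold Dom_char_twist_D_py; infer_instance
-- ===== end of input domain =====

-- B replaces A's per-step power recomputation by running twist products (simpler/faster loop body).

-- ===== PORT A =====
-- Literal port of A's loop over enumerate(irr_s); the enumerate index is ≥ 0,
-- so Python's '**' (nonnegative integer exponent) is exactly '^' on '.toNat'.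
def char_twist_D_py (irr_s : List (Int × Int)) (twist : Int × Int) : List (Int × Int) :=
  let tp := twist.1
  let tn := twist.2
  (PySem.List.enumerate irr_s).foldl
    (fun irr_ss x =>
      let i := x.1
      let pp := x.2.1
      let nn := x.2.2
      let hrl := PySem.Int.floordiv (i + 1) 2
      let rrl := PySem.Int.mod (i + 1) 2
      if rrl = 0 then
        irr_ss ++ [(pp, nn)]
      else
        let tpp := (tp ^ (hrl + 1).toNat) * (tn ^ hrl.toNat)
        let tnn := (tn ^ (hrl + 1).toNat) * (tp ^ hrl.toNat)
        irr_ss ++ [(tpp * pp, tnn * nn)]) []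

-- ===== PORT B =====
def charTwistDGo (l : List (Int × Int)) (t fp fn : Int) (applyTwist : Bool) : List (Int × Int) :=
  match l with
  | [] => []
  | (pp, nn) :: rest =>
    if applyTwist then
      (fp * pp, fn * nn) :: charTwistDGo rest t (fp * t) (fn * t) false
    else
      (pp, nn) :: charTwistDGo rest t fp fn true

def char_twist_D_py_alt (irr_s : List (Int × Int)) (twist : Int × Int) : List (Int × Int) :=
  charTwistDGo irr_s (twist.1 * twist.2) twist.1 twist.2 true

-- ===== PRECONDITION & SPEC =====
def Spec_char_twist_D_py (irr_s : List (Int × Int)) (twist : Int × Int) (out : List (Int × Int)) : Prop := out = char_twist_D_py_alt irr_s twist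
instance (irr_s : List (Int × Int)) (twist : Int × Int) (out : List (Int × Int)) : Decidable (Spec_char_twist_D_py irr_s twist out) := by unfold Spec_char_twist_D_py; infer_instance

-- ===== CLAIM (what is proved, stated in full; the proofs are below) =====
def Claim_equal_char_twist_D_py : Prop := ∀ (irr_s : List (Int × Int)) (twist : Int × Int), Dom_char_twist_D_py irr_s twist → Spec_char_twist_D_py irr_s twist (char_twist_D_py irr_s twist)


-- ===== LEMMAS AND PROOFS =====

-- A's loop body, named for the proofs (definitionally equal to the lambda in the port).
def pvStepA (tp tn : Int) (irr_ss : List (Int × Int)) (x : Int × (Int × Int)) : List (Int × Int) :=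
  let i := x.1
  let pp := x.2.1
  let nn := x.2.2
  let hrl := PySem.Int.floordiv (i + 1) 2
  let rrl := PySem.Int.mod (i + 1) 2
  if rrl = 0 then
    irr_ss ++ [(pp, nn)]
  else
    let tpp := (tp ^ (hrl + 1).toNat) * (tn ^ hrl.toNat)
    let tnn := (tn ^ (hrl + 1).toNat) * (tp ^ hrl.toNat)
    irr_ss ++ [(tpp * pp, tnn * nn)]

-- Invariant: running A's fold on elements indexed from k produces B's recursion
-- seeded with the twist powers for the next odd position, h = (k+1)/2.
theorem char_twist_D_fold_eq (tp tn : Int) :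
    ∀ (l : List (Int × Int)) (k : Nat) (acc : List (Int × Int)),
      (PySem.List.enumerate l (k : Int)).foldl (pvStepA tp tn) acc
      = acc ++ charTwistDGo l (tp * tn)
          (tp ^ ((k + 1) / 2 + 1) * tn ^ ((k + 1) / 2))
          (tn ^ ((k + 1) / 2 + 1) * tp ^ ((k + 1) / 2))
          (decide (k % 2 = 0)) := by
  intro l
  induction l with
  | nil => intro k acc; simp [PySem.List.enumerate_nil, charTwistDGo]
  | cons hd rest ih =>
    intro k acc
    obtain ⟨pp, nn⟩ := hd
    have hcast : (k : Int) + 1 = ((k + 1 : Nat) : Int) := by push_cast; ring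
    have hdiv : PySem.Int.floordiv ((k : Int) + 1) 2 = (((k + 1) / 2 : Nat) : Int) := by
      rw [hcast]; exact_mod_cast PySem.Int.floordiv_natCast (k + 1) 2
    have hmod : PySem.Int.mod ((k : Int) + 1) 2 = (((k + 1) % 2 : Nat) : Int) := by
      rw [hcast]; exact_mod_cast PySem.Int.mod_natCast (k + 1) 2
    rw [PySem.List.enumerate_cons, List.foldl_cons, hcast, ih (k + 1)]
    rcases Nat.even_or_odd k with hk | hk
    · -- k even: odd position (i+1 odd), twist applied
      have hk2 : k % 2 = 0 := Nat.even_iff.mp hk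
      have hmod1 : (k + 1) % 2 = 1 := by omega
      have h1 : (((((k + 1) / 2 : Nat) : Int)) + 1).toNat = (k + 1) / 2 + 1 := by omega
      have h2 : ((((k + 1) / 2 : Nat) : Int)).toNat = (k + 1) / 2 := by omega
      have hstep : pvStepA tp tn acc ((k : Int), (pp, nn))
          = acc ++ [((tp ^ ((k + 1) / 2 + 1) * tn ^ ((k + 1) / 2)) * pp,
                     (tn ^ ((k + 1) / 2 + 1) * tp ^ ((k + 1) / 2)) * nn)] := by
        simp only [pvStepA]
        rw [hdiv, hmod, hmod1, h1, h2]
        simp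
      rw [hstep]
      have hexp : (k + 1 + 1) / 2 = (k + 1) / 2 + 1 := by omega
      have hfp : tp ^ ((k + 1 + 1) / 2 + 1) * tn ^ ((k + 1 + 1) / 2)
          = tp ^ ((k + 1) / 2 + 1) * tn ^ ((k + 1) / 2) * (tp * tn) := by
        rw [hexp]; ring
      have hfn : tn ^ ((k + 1 + 1) / 2 + 1) * tp ^ ((k + 1 + 1) / 2)
          = tn ^ ((k + 1) / 2 + 1) * tp ^ ((k + 1) / 2) * (tp * tn) := by
        rw [hexp]; ring
      rw [hfp, hfn]
      simp [charTwistDGo, hk2, hmod1]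
    · -- k odd: even position (i+1 even), element unchanged
      have hk2 : k % 2 = 1 := Nat.odd_iff.mp hk
      have hmod0 : (k + 1) % 2 = 0 := by omega
      have hstep : pvStepA tp tn acc ((k : Int), (pp, nn)) = acc ++ [(pp, nn)] := by
        simp only [pvStepA]
        rw [hmod, hmod0]
        simp
      rw [hstep]
      have hexp : (k + 1 + 1) / 2 = (k + 1) / 2 := by omega
      rw [hexp]
      simp [charTwistDGo, hk2, hmod0]

-- ===== VERDICT (by name: the statement is the Claim_ definition above) =====
theorem char_twist_D_py_spec : Claim_equal_char_twist_D_py := by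
  intro irr_s twist _
  show char_twist_D_py irr_s twist = char_twist_D_py_alt irr_s twist
  have h := char_twist_D_fold_eq twist.1 twist.2 irr_s 0 []
  norm_num at h
  exact h
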